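-- pv_equiv track=rewrite | github.com/neozeno/programacion-en-python-uniandes | 01-programacion-en-python/M3/retos/producto_mas_costoso.py | producto_mas_costoso
-- ===== SOURCE A (Python) =====
-- def producto_mas_costoso(carrito: dict[str, int]) -> str | None:
--     if len(carrito) == 0:
--         return "No hay productos en el carrito"
--
--     precio_mayor: int = max(carrito.values())
--
--     candidatos: list[str] = [
--         producto for producto, precio in carrito.items() if precio == precio_mayor
--     ]
--
--     return min(candidatos, key=lambda nombre: nombre.lower())
-- ===== SOURCE B (Python) =====
-- def producto_mas_costoso(carrito: dict[str, int]) -> str | None: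
--     if len(carrito) == 0:
--         return "No hay productos en el carrito"
--
--     best_name = None
--     best_price = None
--     for nombre, precio in carrito.items():
--         if best_price is None or precio > best_price:
--             best_price = precio
--             best_name = nombre
--         elif precio == best_price and nombre.lower() < best_name.lower():
--             best_name = nombre
--     return best_name
-- ===== Notes on version B (the rewrite author's own statement) =====
-- stated objective: alternative
-- what changed: Replaces the three separate passes (max over values, filter of candidates, min by lowercase name) with one accumulating scan keeping the current best price and best name; strict '<' on the lowered name preserves min's first-wins tie-breaking.
import Mathlib
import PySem

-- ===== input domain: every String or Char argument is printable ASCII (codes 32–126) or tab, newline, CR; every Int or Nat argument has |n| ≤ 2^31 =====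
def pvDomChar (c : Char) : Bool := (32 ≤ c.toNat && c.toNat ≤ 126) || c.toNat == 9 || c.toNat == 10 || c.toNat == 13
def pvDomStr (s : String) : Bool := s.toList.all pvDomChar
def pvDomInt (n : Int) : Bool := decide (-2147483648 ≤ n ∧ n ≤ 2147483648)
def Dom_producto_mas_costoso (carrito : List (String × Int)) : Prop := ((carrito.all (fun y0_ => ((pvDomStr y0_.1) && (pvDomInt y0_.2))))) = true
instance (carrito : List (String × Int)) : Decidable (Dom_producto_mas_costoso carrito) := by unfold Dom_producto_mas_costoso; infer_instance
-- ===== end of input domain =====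

-- B replaces A's three passes (max over values, filter, min by lowercase name) with one accumulating single scan; same result.


-- ===== PORT A =====
-- if len(carrito)==0: return "No hay..."; precio_mayor = max(values); candidatos = [p for p,v in items if v==precio_mayor]; return min(candidatos, key=lower)
def producto_mas_costoso (carrito : List (String × Int)) : Option String :=
  if carrito.length = 0 then some "No hay productos en el carrito"
  else
    match PySem.List.max? (carrito.map Prod.snd) (fun v => v) with
    | none => none  -- unreachable: carrito nonempty
    | some precio_mayor =>
      let candidatos : List String :=
        (carrito.filter (fun x => x.2 == precio_mayor)).map Prod.fst
      PySem.List.min? candidatos (fun nombre => PySem.Str.lower nombre)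

-- ===== PORT B =====
-- one loop body: take the new item on strictly higher price; on equal price take it only if its lowered name is strictly smaller
def pmcStep (acc : Option (Int × String)) (x : String × Int) : Option (Int × String) :=
  match acc with
  | none => some (x.2, x.1)
  | some (bp, bn) =>
    if bp < x.2 then some (x.2, x.1)
    else if x.2 = bp ∧ PySem.Str.lower x.1 < PySem.Str.lower bn then some (bp, x.1)
    else some (bp, bn)

def producto_mas_costoso_alt (carrito : List (String × Int)) : Option String :=
  if carrito.length = 0 then some "No hay productos en el carrito"
  else (carrito.foldl pmcStep none).map Prod.snd

-- ===== PRECONDITION & SPEC =====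
def Spec_producto_mas_costoso (carrito : List (String × Int)) (out : Option String) : Prop := out = producto_mas_costoso_alt carrito
instance (carrito : List (String × Int)) (out : Option String) : Decidable (Spec_producto_mas_costoso carrito out) := by unfold Spec_producto_mas_costoso; infer_instance

-- ===== CLAIM (what is proved, stated in full; the proofs are below) =====
def Claim_equal_producto_mas_costoso : Prop := ∀ (carrito : List (String × Int)), Dom_producto_mas_costoso carrito → Spec_producto_mas_costoso carrito (producto_mas_costoso carrito)

-- ===== LEMMAS AND PROOFS =====

-- min? drops the head when the next element's key is strictly smaller
theorem pmc_min_drop (a b : String) (xs : List String)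
    (h : PySem.Str.lower b < PySem.Str.lower a) :
    PySem.List.min? (a :: b :: xs) (fun n => PySem.Str.lower n)
      = PySem.List.min? (b :: xs) (fun n => PySem.Str.lower n) := by
  simp [PySem.List.min?, List.foldl, h]

-- min? drops the second element when its key is not strictly smaller than the head's
theorem pmc_min_keep (a b : String) (xs : List String)
    (h : ¬ PySem.Str.lower b < PySem.Str.lower a) :
    PySem.List.min? (a :: b :: xs) (fun n => PySem.Str.lower n)
      = PySem.List.min? (a :: xs) (fun n => PySem.Str.lower n) := by
  simp [PySem.List.min?, List.foldl, h]

-- loop invariant: B's fold carries the running max price and the stable min-by-lower name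
-- among the items seen so far (represented by the seed (bn, bp) consed in front)
theorem pmc_loop (t : List (String × Int)) : ∀ (bp : Int) (bn : String), ∃ N,
    t.foldl pmcStep (some (bp, bn))
      = some (t.foldl (fun a x => max a x.2) bp, N) ∧
    PySem.List.min?
      ((((bn, bp) :: t).filter
          (fun x => x.2 == t.foldl (fun a x => max a x.2) bp)).map Prod.fst)
      (fun n => PySem.Str.lower n) = some N := by
  induction t with
  | nil =>
    intro bp bn
    exact ⟨bn, rfl, by simp [PySem.List.min?, List.filter]⟩
  | cons y t' ih =>
    intro bp bn
    by_cases h1 : bp < y.2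
    · -- strictly higher price: restart with y
      obtain ⟨N, hf, hm⟩ := ih y.2 y.1
      have hy2 : y.2 ≤ t'.foldl (fun a x => max a x.2) y.2 :=
        (PySem.List.le_foldl_max_int t' (fun x => x.2) y.2).1
      have hbpne : (bp == t'.foldl (fun a x => max a x.2) y.2) = false := by
        simp; omega
      have hstep : pmcStep (some (bp, bn)) y = some (y.2, y.1) := by
        simp only [pmcStep]; rw [if_pos h1]
      refine ⟨N, ?_, ?_⟩
      · rw [List.foldl_cons, hstep, hf, List.foldl_cons, max_eq_right (le_of_lt h1)]
      · simpa [List.foldl, max_eq_right (le_of_lt h1), List.filter, hbpne] using hm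
    · by_cases h2 : y.2 = bp ∧ PySem.Str.lower y.1 < PySem.Str.lower bn
      · -- same price, strictly smaller lowered name: name becomes y.1
        obtain ⟨N, hf, hm⟩ := ih bp y.1
        have hy2 : y.2 ≤ bp := le_of_not_gt h1
        have hmax : max bp y.2 = bp := max_eq_left hy2
        have hstep : pmcStep (some (bp, bn)) y = some (bp, y.1) := by
          simp only [pmcStep]; rw [if_neg h1, if_pos h2]
        refine ⟨N, ?_, ?_⟩
        · rw [List.foldl_cons, hstep, hf, List.foldl_cons, hmax]
        · by_cases hbm : bp = t'.foldl (fun a x => max a x.2) bp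
          · -- both the old name and y survive the filter; min? drops the old one
            rw [List.foldl, hmax]
            have : (((bn, bp) :: y :: t').filter
                (fun x => x.2 == t'.foldl (fun a x => max a x.2) bp)).map Prod.fst
                = bn :: y.1 :: ((t'.filter
                    (fun x => x.2 == t'.foldl (fun a x => max a x.2) bp)).map Prod.fst) := by
              simp [List.filter, ← hbm, h2.1]
            rw [this, pmc_min_drop _ _ _ h2.2]
            simpa [List.filter, ← hbm, h2.1] using hm
          · -- price bp never reaches the max: both entries are filtered out
            rw [List.foldl, hmax]
            have hb : (bp == t'.foldl (fun a x => max a x.2) bp) = false := by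
              simp [hbm]
            simpa [List.filter, hb, h2.1] using hm
      · -- item ignored by the loop
        obtain ⟨N, hf, hm⟩ := ih bp bn
        have hy2 : y.2 ≤ bp := le_of_not_gt h1
        have hmax : max bp y.2 = bp := max_eq_left hy2
        have hbfold : bp ≤ t'.foldl (fun a x => max a x.2) bp :=
          (PySem.List.le_foldl_max_int t' (fun x => x.2) bp).1
        have hstep : pmcStep (some (bp, bn)) y = some (bp, bn) := by
          simp only [pmcStep]; rw [if_neg h1, if_neg h2]
        refine ⟨N, ?_, ?_⟩
        · rw [List.foldl_cons, hstep, hf, List.foldl_cons, hmax]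
        · rw [List.foldl, hmax]
          by_cases hym : y.2 = t'.foldl (fun a x => max a x.2) bp
          · -- then y.2 = bp = max, and y's name is not strictly smaller: min? keeps bn
            have hybp : y.2 = bp := by omega
            have hnl : ¬ PySem.Str.lower y.1 < PySem.Str.lower bn := by
              intro hc; exact h2 ⟨hybp, hc⟩
            have hbm : (bp == t'.foldl (fun a x => max a x.2) bp) = true := by
              simp; omega
            have : (((bn, bp) :: y :: t').filter
                (fun x => x.2 == t'.foldl (fun a x => max a x.2) bp)).map Prod.fst
                = bn :: y.1 :: ((t'.filter
                    (fun x => x.2 == t'.foldl (fun a x => max a x.2) bp)).map Prod.fst) := by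
              simp [List.filter, hbm, hym]
            rw [this, pmc_min_keep _ _ _ hnl]
            simpa [List.filter, hbm] using hm
          · have hyf : (y.2 == t'.foldl (fun a x => max a x.2) bp) = false := by
              simp [hym]
            simpa [List.filter, hyf] using hm

-- ===== VERDICT (by name: the statement is the Claim_ definition above) =====
theorem producto_mas_costoso_spec : Claim_equal_producto_mas_costoso := by
  intro carrito _
  unfold Spec_producto_mas_costoso
  cases carrito with
  | nil => rfl
  | cons x t =>
    obtain ⟨N, hf, hm⟩ := pmc_loop t x.2 x.1
    have hmax : PySem.List.max? ((x :: t).map Prod.snd) (fun v => v)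
        = some (t.foldl (fun a p => max a p.2) x.2) := by
      rw [List.map_cons, PySem.List.max?_id_cons, List.foldl_map]
    simp only [producto_mas_costoso, producto_mas_costoso_alt, List.length_cons,
      List.foldl_cons]
    rw [hmax]
    have hstep : pmcStep none x = some (x.2, x.1) := rfl
    rw [hstep, hf]
    simpa using hm
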